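-- pv_equiv track=rewrite | github.com/chaosparrot/marithime_talon | core/input_history/input_indexer.py | determine_diverges_from
-- ===== SOURCE A (Python) =====
-- def determine_diverges_from(previous_text: str, current_text: str, inserted: str = "") -> (int, int):
--     line_index = -1
--     from_end_of_line = -1
--     normalized_inserted = inserted.replace("\r\n", "\n").replace("\r", "\n")
--
--     # If everything is deleted - We estimate that we are at position 0, 0
--     if current_text == "" and inserted == "":
--         return (0, 0)
--     elif current_text != "":
--         is_deletion = inserted == "" and len(current_text) < len(previous_text)
--         is_insertion = inserted != "" and len(current_text) - len(inserted) == len(previous_text)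
--
--         current_text = current_text.replace("\r\n", "\n")
--         previous_text = previous_text.replace("\r\n", "\n")
--
--         # Find the location where are are diverging from the text
--         line_count = 1
--         character_in_line_index = 0
--         divergence_index = -1
--         convergence_index = -1
--         for char_index, char in enumerate(current_text):
--             if char == "\n":
--                 line_count += 1
--                 character_in_line_index = 0
--
--             if char_index < len(previous_text) and (char != previous_text[char_index]):
--                 divergence_index = char_index
--
--                 # Within a deletion we only need to known when the next character is the same again to find the convergence point
--                 if is_deletion:
--                     for previous_index in range(divergence_index, len(previous_text)):
--                         if previous_text[previous_index] == current_text[divergence_index] and current_text[divergence_index:] == previous_text[previous_index:]: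
--                             convergence_index = previous_index
--
--                             # Not sure why this fixes the multiline indexation but we'll take it
--                             if line_count > 1:
--                                 character_in_line_index -= 1
--
--                             # If we are deleting some text and the text following the deletion is the same, we do not know the exact location
--                             removed_text = previous_text[divergence_index:convergence_index]
--                             current_text_lines = ""
--                             if ( previous_index + 1 < len(previous_text) and previous_text[previous_index + 1:].startswith(removed_text) ) or \
--                                 current_text[:char_index].endswith(removed_text):
--                                 return (line_count - 1, -1)
--                             break
--
--                     break
--                 else:
--                     insertion_length = len(normalized_inserted)
--                     start_substring = max(0, divergence_index - insertion_length)
--                     substring_range = current_text[start_substring:divergence_index + insertion_length]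
--                     found_index = substring_range.find(normalized_inserted)
--                     while found_index > -1:
--                         if found_index <= insertion_length:
--                             character_in_line_index = start_substring + found_index
--                             break
--                         found_index = substring_range.find(normalized_inserted, found_index + 1)
--
--                     # If the substring of the inserted text does not appear in the area where we are changing
--                     if found_index == -1:
--                         return (-1, -1)
--                     else:
--                         break
--
--             if divergence_index >= 0 and convergence_index >= 0:
--                 break
--             character_in_line_index += 1
--
--         # When we are appending to the text, we can assume the final line count as well as the character location being the last of the sentence
--         if divergence_index == -1 and is_insertion and current_text.startswith(previous_text):
--             return (line_count - 1, 0)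
--
--         # If characters are deleted from the end of the selection, we know it is at the end of the current text
--         if is_deletion and divergence_index == -1:
--             line_index = len(current_text.split("\n")) -1
--             from_end_of_line = 0
--
--         elif divergence_index >= 0:
--             line_index = line_count - 1 + max(0, len(normalized_inserted.split("\n")) - 1)
--             current_text_lines = current_text.split("\n")
--             line = current_text_lines[line_index] if line_index < len(current_text_lines) else current_text_lines[-1]
--
--             if is_deletion:
--                 from_end_of_line = len(line) - character_in_line_index
--             else:
--                 inserted_text_lines = normalized_inserted.split("\n")
--
--                 # For multiline insertions, make sure that the character index of the insertion is used
--                 # Instead of the found character index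
--                 character_in_line_index = 0 if len(inserted_text_lines) > 1 else character_in_line_index
--                 if len(inserted_text_lines) > 1:
--                     character_in_line_index = len(inserted_text_lines[-1])
--                     from_end_of_line = len(line) - character_in_line_index
--                 else:
--                     from_end_of_line = len(line) - (character_in_line_index + len(normalized_inserted))
--
--     return (line_index, from_end_of_line)
-- ===== SOURCE B (Python) =====
-- def determine_diverges_from(previous_text: str, current_text: str, inserted: str = "") -> (int, int):
--     # Arithmetic re-implementation: a newline-position index plus closed-form
--     # divergence/convergence arithmetic instead of A's fused scan with nested loops.
--     if current_text == "" and inserted == "":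
--         return (0, 0)
--     if current_text == "":
--         return (-1, -1)
--
--     norm_ins = inserted.replace("\r\n", "\n").replace("\r", "\n")
--     is_deletion = inserted == "" and len(current_text) < len(previous_text)
--     is_insertion = inserted != "" and len(current_text) - len(inserted) == len(previous_text)
--     cur = current_text.replace("\r\n", "\n")
--     prev = previous_text.replace("\r\n", "\n")
--
--     nl = [i for i in range(len(cur)) if cur[i] == "\n"]  # newline positions of cur
--
--     def line_len(i):
--         i = min(i, len(nl))              # clamp to the last line (A's lines[-1] fallback)
--         lo = nl[i - 1] + 1 if i > 0 else 0
--         hi = nl[i] if i < len(nl) else len(cur)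
--         return hi - lo
--
--     d = next((i for i, pc in enumerate(zip(prev, cur)) if pc[0] != pc[1]), -1)
--
--     if d == -1:
--         if (is_insertion and cur.startswith(prev)) or is_deletion:
--             return (len(nl), 0)
--         return (-1, -1)
--
--     lc = 1 + sum(1 for p in nl if p <= d)
--     before = [p for p in nl if p < d]
--     cil = 0 if cur[d] == "\n" else (d - before[-1] if before else d)
--
--     if is_deletion:
--         p0 = len(prev) - len(cur) + d     # the only possible convergence point
--         k = p0 - d                        # length of the removed text
--         if p0 >= d and prev[p0:] == cur[d:]:
--             if lc > 1:
--                 cil -= 1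
--             removed = prev[d:p0]
--             ambiguous = (p0 + 1 < len(prev) and prev[p0 + 1:p0 + 1 + k] == removed) \
--                 or (k <= d and cur[d - k:d] == removed)
--             if ambiguous:
--                 return (lc - 1, -1)
--         return (lc - 1, line_len(lc - 1) - cil)
--
--     # insertion / replacement: minimal occurrence of norm_ins within reach of d
--     L = len(norm_ins)
--     start = max(0, d - L)
--     seg = cur[start:d + L]
--     pos = -1
--     for off in range(0, L + 1):
--         if off + L <= len(seg) and seg[off:off + L] == norm_ins:
--             pos = off
--             break
--     if pos == -1:
--         return (-1, -1)
--     ins_nl = [i for i in range(L) if norm_ins[i] == "\n"]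
--     li = lc - 1 + len(ins_nl)
--     if ins_nl:
--         return (li, line_len(li) - (L - 1 - ins_nl[-1]))
--     return (li, line_len(li) - (start + pos + L))
-- ===== Notes on version B (the rewrite author's own statement) =====
-- stated objective: alternative
-- what changed: B replaces A's fused character loop with its nested inner scans by staged passes over precomputed data: it builds a newline-position index once and derives line count, in-line position and every line length by arithmetic on that index (no split/line list walk), finds the divergence point with a single lockstep first-mismatch search over zip(prev,cur), computes the deletion convergence point in closed form as len(prev)-len(cur)+d with one suffix equality check instead of A's suffix-comparison loop, and accepts an insertion by scanning the at most len(ins)+1 candidate offsets instead of A's …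
import Mathlib
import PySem

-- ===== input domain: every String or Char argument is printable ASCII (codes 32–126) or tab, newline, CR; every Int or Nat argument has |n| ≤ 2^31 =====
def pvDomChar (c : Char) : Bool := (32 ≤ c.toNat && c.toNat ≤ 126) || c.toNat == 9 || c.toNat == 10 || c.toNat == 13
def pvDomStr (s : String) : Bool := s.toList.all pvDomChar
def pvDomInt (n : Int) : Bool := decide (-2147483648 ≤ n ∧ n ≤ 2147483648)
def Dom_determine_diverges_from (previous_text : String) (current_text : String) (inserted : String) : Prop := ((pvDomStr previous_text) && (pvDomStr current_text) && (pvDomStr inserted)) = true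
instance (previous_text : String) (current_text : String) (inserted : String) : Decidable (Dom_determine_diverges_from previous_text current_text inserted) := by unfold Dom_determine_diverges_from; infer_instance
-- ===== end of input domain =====

-- B replaces A's fused scan with nested inner loops by staged passes: a newline-position
-- index queried by arithmetic, a lockstep first-mismatch search, a closed-form deletion
-- convergence point and a bounded candidate-offset scan for insertions (objective: alternative).

-- ===== PORT A =====
-- Transliteration of A. Loops become structural recursions over the same state;
-- Python str primitives are ported with PySem.Chars; Nat subtraction `k - L`
-- is Python's max(0, k - L); nonnegative slices are ported as drop/take
-- (= PySem.List.slice at natural bounds).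

-- `for previous_index in range(divergence_index, len(previous_text)): ...`
def aInnerDel (prev cur : List Char) (d p : Nat) : Option Nat :=
  if _h : p < prev.length then
    if prev.getD p ' ' = cur.getD d ' ' ∧ List.drop d cur = List.drop p prev then some p
    else aInnerDel prev cur d (p + 1)
  else none
termination_by prev.length - p

-- `while found_index > -1: ...` (fuel seg.length + 1 is never exhausted: find
-- results strictly increase and stay below seg.length on the looping path)
def aFindLoop (seg ins : List Char) (L : Nat) (f : Int) : Nat → Int
  | 0 => if f > -1 then (if f ≤ (L : Int) then f else -1) else -1
  | n + 1 =>
    if f > -1 then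
      if f ≤ (L : Int) then f
      else aFindLoop seg ins L (PySem.Chars.findFrom seg ins (f + 1) none) n
    else -1

-- the loop body once the divergence point is hit (A returns or breaks right after);
-- result: Sum.inl = early return, Sum.inr = state at the break
-- (line_count, character_in_line_index, divergence_index, convergence_index)
def aDivStep (prev cur ins : List Char) (isDel : Bool) (k : Nat) (lc cil : Int) :
    (Int × Int) ⊕ (Int × Int × Int × Int) :=
  if isDel then
    match aInnerDel prev cur k k with
    | some p =>
        if (p + 1 < prev.length ∧ PySem.Chars.startswith (List.drop (p + 1) prev) (List.take (p - k) (List.drop k prev)) = true)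
            ∨ PySem.Chars.endswith (List.take k cur) (List.take (p - k) (List.drop k prev)) = true
        then Sum.inl (lc - 1, -1)
        else Sum.inr (lc, (if lc > 1 then cil - 1 else cil), (k : Int), (p : Int))
    | none => Sum.inr (lc, cil, (k : Int), -1)
  else
    if aFindLoop (List.take (k + ins.length - (k - ins.length)) (List.drop (k - ins.length) cur)) ins ins.length
        (PySem.Chars.find (List.take (k + ins.length - (k - ins.length)) (List.drop (k - ins.length) cur)) ins)
        ((List.take (k + ins.length - (k - ins.length)) (List.drop (k - ins.length) cur)).length + 1) = -1
    then Sum.inl (-1, -1)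
    else Sum.inr (lc,
      ((k - ins.length : Nat) : Int) + aFindLoop (List.take (k + ins.length - (k - ins.length)) (List.drop (k - ins.length) cur)) ins ins.length
        (PySem.Chars.find (List.take (k + ins.length - (k - ins.length)) (List.drop (k - ins.length) cur)) ins)
        ((List.take (k + ins.length - (k - ins.length)) (List.drop (k - ins.length) cur)).length + 1),
      (k : Int), -1)

-- `for char_index, char in enumerate(current_text): ...`
def aLoop (prev cur ins : List Char) (isDel : Bool) (k : Nat) (lc cil : Int) :
    (Int × Int) ⊕ (Int × Int × Int × Int) :=
  if _h : k < cur.length then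
    if k < prev.length ∧ ¬ cur.getD k ' ' = prev.getD k ' ' then
      aDivStep prev cur ins isDel k
        (if cur.getD k ' ' = '\n' then lc + 1 else lc)
        (if cur.getD k ' ' = '\n' then 0 else cil)
    else
      -- `if divergence_index >= 0 and convergence_index >= 0: break` cannot fire
      -- on this path (both are still -1)
      aLoop prev cur ins isDel (k + 1)
        (if cur.getD k ' ' = '\n' then lc + 1 else lc)
        ((if cur.getD k ' ' = '\n' then 0 else cil) + 1)
  else Sum.inr (lc, cil, -1, -1)
termination_by cur.length - k

def determine_diverges_from (previous_text : String) (current_text : String) (inserted : String) : Int × Int :=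
  let pT := previous_text.toList
  let cT := current_text.toList
  let iT := inserted.toList
  let normIns := PySem.Chars.replace (PySem.Chars.replace iT ['\r', '\n'] ['\n']) ['\r'] ['\n']
  if cT = [] ∧ iT = [] then (0, 0)
  else if cT ≠ [] then
    let isDel : Bool := decide (iT = []) && decide (cT.length < pT.length)
    let isIns : Bool := decide (iT ≠ []) && decide ((cT.length : Int) - (iT.length : Int) = (pT.length : Int))
    let cur := PySem.Chars.replace cT ['\r', '\n'] ['\n']
    let prev := PySem.Chars.replace pT ['\r', '\n'] ['\n']
    match aLoop prev cur normIns isDel 0 1 0 with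
    | Sum.inl r => r
    | Sum.inr (lc, cil, dv, _conv) =>
      if dv = -1 ∧ isIns = true ∧ PySem.Chars.startswith cur prev = true then (lc - 1, 0)
      else if isDel = true ∧ dv = -1 then (((PySem.Chars.splitOn cur ['\n']).length : Int) - 1, 0)
      else if dv ≥ 0 then
        let li : Int := lc - 1 + max 0 (((PySem.Chars.splitOn normIns ['\n']).length : Int) - 1)
        let lines := PySem.Chars.splitOn cur ['\n']
        let line := if li < (lines.length : Int) then (PySem.List.pyGet? lines li).getD [] else (PySem.List.pyGet? lines (-1)).getD []
        if isDel = true then (li, (line.length : Int) - cil)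
        else
          let insLines := PySem.Chars.splitOn normIns ['\n']
          if insLines.length > 1 then (li, (line.length : Int) - (((PySem.List.pyGet? insLines (-1)).getD []).length : Int))
          else (li, (line.length : Int) - (cil + (normIns.length : Int)))
      else (-1, -1)
  else (-1, -1)

-- ===== PORT B =====
-- Transliteration of Source B, stage by stage.

-- `nl = [i for i in range(len(cur)) if cur[i] == "\n"]`
def bNl (cur : List Char) : List Nat :=
  (List.range cur.length).filter (fun i => cur.getD i ' ' = '\n')

-- `def line_len(i): ...` (indexing nl is always in range where Source B calls it)
def bLineLen (nl : List Nat) (curLen : Nat) (i : Int) : Int :=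
  let j := min i (nl.length : Int)
  let lo : Int := if 0 < j then (nl.getD (j.toNat - 1) 0 : Int) + 1 else 0
  let hi : Int := if j < (nl.length : Int) then (nl.getD j.toNat 0 : Int) else (curLen : Int)
  hi - lo

-- `d = next((i for i, pc in enumerate(zip(prev, cur)) if pc[0] != pc[1]), -1)`
def bMism (prev cur : List Char) : Int :=
  match (List.zip prev cur).findIdx? (fun pc => pc.1 != pc.2) with
  | some i => (i : Int)
  | none => -1

-- `for off in range(0, L + 1): if off + L <= len(seg) and seg[off:off+L] == norm_ins: pos = off; break`
def bScan (seg ins : List Char) (L off : Nat) : Int :=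
  if _h : off ≤ L then
    if off + L ≤ seg.length ∧ (List.drop off seg).take L = ins then (off : Int)
    else bScan seg ins L (off + 1)
  else -1
termination_by L + 1 - off

def determine_diverges_from_alt (previous_text : String) (current_text : String) (inserted : String) : Int × Int :=
  let pT := previous_text.toList
  let cT := current_text.toList
  let iT := inserted.toList
  if cT = [] ∧ iT = [] then (0, 0)
  else if cT = [] then (-1, -1)
  else
    let normIns := PySem.Chars.replace (PySem.Chars.replace iT ['\r', '\n'] ['\n']) ['\r'] ['\n']
    let isDel : Bool := decide (iT = []) && decide (cT.length < pT.length)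
    let isIns : Bool := decide (iT ≠ []) && decide ((cT.length : Int) - (iT.length : Int) = (pT.length : Int))
    let cur := PySem.Chars.replace cT ['\r', '\n'] ['\n']
    let prev := PySem.Chars.replace pT ['\r', '\n'] ['\n']
    let nl := bNl cur
    let d := bMism prev cur
    if d = -1 then
      if (isIns = true ∧ PySem.Chars.startswith cur prev = true) ∨ isDel = true then ((nl.length : Int), 0)
      else (-1, -1)
    else
      let dn := d.toNat
      let lc : Int := 1 + (nl.countP (fun p => p ≤ dn) : Int)
      let before := nl.filter (fun p => p < dn)
      let cil : Int :=
        if PySem.List.pyGetD cur d ' ' = '\n' then 0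
        else if before ≠ [] then (dn : Int) - ((PySem.List.pyGet? before (-1)).getD 0 : Int)
        else (dn : Int)
      if isDel = true then
        let p0 : Int := (prev.length : Int) - (cur.length : Int) + d
        let k : Int := p0 - d
        if p0 ≥ d ∧ List.drop p0.toNat prev = List.drop dn cur then
          let cil' := if lc > 1 then cil - 1 else cil
          let removed := List.take k.toNat (List.drop dn prev)
          if (p0 + 1 < (prev.length : Int) ∧ List.take k.toNat (List.drop (p0.toNat + 1) prev) = removed)
              ∨ (k ≤ (dn : Int) ∧ List.drop (dn - k.toNat) (List.take dn cur) = removed)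
          then (lc - 1, -1)
          else (lc - 1, bLineLen nl cur.length (lc - 1) - cil')
        else (lc - 1, bLineLen nl cur.length (lc - 1) - cil)
      else
        let L := normIns.length
        let start := dn - L
        let seg := (List.drop start cur).take (dn + L - start)
        let pos := bScan seg normIns L 0
        if pos = -1 then (-1, -1)
        else
          let insNl := bNl normIns
          let li : Int := lc - 1 + (insNl.length : Int)
          if insNl ≠ [] then
            (li, bLineLen nl cur.length li - ((L : Int) - 1 - ((PySem.List.pyGet? insNl (-1)).getD 0 : Int)))
          else (li, bLineLen nl cur.length li - ((start : Int) + pos + (L : Int)))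

-- ===== PRECONDITION & SPEC =====
def Spec_determine_diverges_from (previous_text : String) (current_text : String) (inserted : String) (out : Int × Int) : Prop := out = determine_diverges_from_alt previous_text current_text inserted
instance (previous_text : String) (current_text : String) (inserted : String) (out : Int × Int) : Decidable (Spec_determine_diverges_from previous_text current_text inserted out) := by unfold Spec_determine_diverges_from; infer_instance

-- ===== CLAIM (what is proved, stated in full; the proofs are below) =====
def Claim_equal_determine_diverges_from : Prop := ∀ (previous_text : String) (current_text : String) (inserted : String), Dom_determine_diverges_from previous_text current_text inserted → Spec_determine_diverges_from previous_text current_text inserted (determine_diverges_from previous_text current_text inserted)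

-- ===== LEMMAS AND PROOFS =====

-- proof-side spec functions and A-loop characterisation
def pMism : List Char → List Char → Option Nat
  | a :: p', b :: c' => if ¬ b = a then some 0 else (pMism p' c').map (· + 1)
  | _, _ => none

def bTail : List Char → Nat
  | [] => 0
  | ch :: r => if ch = '\n' then 0 else bTail r + 1

def lcSpec (s : List Char) : Int := 1 + (s.count '\n' : Int)
def cilSpec (s : List Char) : Int :=
  (bTail s.reverse : Int) + (if bTail s.reverse = s.length then 0 else 1)

def aResult (prev cur ins : List Char) (isDel : Bool) (k : Nat) :
    (Int × Int) ⊕ (Int × Int × Int × Int) :=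
  match pMism (List.drop k prev) (List.drop k cur) with
  | none => Sum.inr (lcSpec cur, cilSpec cur, -1, -1)
  | some j =>
      aDivStep prev cur ins isDel (k + j)
        (if cur.getD (k + j) ' ' = '\n' then lcSpec (List.take (k + j) cur) + 1 else lcSpec (List.take (k + j) cur))
        (if cur.getD (k + j) ' ' = '\n' then 0 else cilSpec (List.take (k + j) cur))

-- structural images of splitOn / the newline comprehension
def pNl : List Char → List Nat
  | [] => []
  | ch :: t => if ch = '\n' then 0 :: (pNl t).map (· + 1) else (pNl t).map (· + 1)

def pSplit : List Char → List (List Char)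
  | [] => [[]]
  | ch :: t =>
      if ch = '\n' then [] :: pSplit t
      else match pSplit t with
        | h :: r => (ch :: h) :: r
        | [] => [[ch]]

def hpre (p : List Char) : List (List Char) → List (List Char)
  | [] => [p]
  | h :: r => (p ++ h) :: r

lemma pMism_nil_right (p : List Char) : pMism p [] = none := by
  cases p <;> rfl

lemma pMism_bounds (p c : List Char) (j : Nat) (h : pMism p c = some j) :
    j < p.length ∧ j < c.length := by
  revert h; induction p generalizing c j with
  | nil => intro h; cases c <;> simp [pMism] at h
  | cons a p' ih =>
    intro h
    cases c with
    | nil => simp [pMism] at h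
    | cons b c' =>
      by_cases hab : ¬ b = a
      · simp only [pMism, if_pos hab] at h
        obtain rfl : (0 : Nat) = j := by simpa using h
        simp
      · simp only [pMism, if_neg hab, Option.map_eq_some_iff] at h
        obtain ⟨j', hj', rfl⟩ := h
        have := ih c' j' hj'
        simp; omega

lemma lcSpec_append (s : List Char) (ch : Char) :
    lcSpec (s ++ [ch]) = if ch = '\n' then lcSpec s + 1 else lcSpec s := by
  simp only [lcSpec, List.count_append, List.count_singleton]
  by_cases h : ch = '\n'
  · simp [h]; ring
  · have h2 : ¬ ('\n' = ch) := fun hh => h hh.symm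
    simp [h]

lemma cilSpec_append (s : List Char) (ch : Char) :
    cilSpec (s ++ [ch]) = (if ch = '\n' then 0 else cilSpec s) + 1 := by
  simp only [cilSpec, List.reverse_append, List.reverse_cons, List.reverse_nil,
    List.nil_append, List.cons_append, List.length_append, List.length_cons, List.length_nil]
  by_cases h : ch = '\n'
  · simp [bTail, h]
  · simp only [bTail, if_neg h]
    by_cases h2 : bTail s.reverse = s.length
    · simp [h2]
    · have h3 : ¬ (bTail s.reverse + 1 = s.length + 1) := by omega
      simp [h2]

lemma take_succ_concat (s : List Char) (k : Nat) (h : k < s.length) :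
    List.take (k + 1) s = List.take k s ++ [s[k]] := by
  rw [List.take_add_one, List.getElem?_eq_getElem h]
  rfl

lemma aLoop_eq (prev cur ins : List Char) (isDel : Bool) :
    ∀ n k, cur.length - k ≤ n →
      aLoop prev cur ins isDel k (lcSpec (List.take k cur)) (cilSpec (List.take k cur)) =
        aResult prev cur ins isDel k := by
  intro n
  induction n with
  | zero =>
    intro k hk
    rw [aLoop, dif_neg (by omega : ¬ k < cur.length)]
    unfold aResult
    rw [List.drop_eq_nil_of_le (by omega : cur.length ≤ k), pMism_nil_right,
      List.take_of_length_le (by omega : cur.length ≤ k)]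
  | succ n ih =>
    intro k hk
    by_cases hkc : k < cur.length
    · rw [aLoop, dif_pos hkc]
      have hgc : cur.getD k ' ' = cur[k] := List.getD_eq_getElem _ _ hkc
      have hstep_lc : (if cur.getD k ' ' = '\n' then lcSpec (List.take k cur) + 1 else lcSpec (List.take k cur)) = lcSpec (List.take (k + 1) cur) := by
        rw [take_succ_concat cur k hkc, lcSpec_append, hgc]
      have hstep_cil : ((if cur.getD k ' ' = '\n' then 0 else cilSpec (List.take k cur)) + 1) = cilSpec (List.take (k + 1) cur) := by
        rw [take_succ_concat cur k hkc, cilSpec_append, hgc]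
      have hdc : List.drop k cur = cur[k] :: List.drop (k + 1) cur := List.drop_eq_getElem_cons hkc
      by_cases hkp : k < prev.length
      · have hgp : prev.getD k ' ' = prev[k] := List.getD_eq_getElem _ _ hkp
        have hdp : List.drop k prev = prev[k] :: List.drop (k + 1) prev := List.drop_eq_getElem_cons hkp
        by_cases hne : cur[k] = prev[k]
        · rw [if_neg (fun hcon => hcon.2 (by rw [hgc, hgp]; exact hne))]
          rw [hstep_lc, hstep_cil, ih (k + 1) (by omega)]
          unfold aResult
          rw [hdc, hdp]
          have hmap : pMism (prev[k] :: List.drop (k + 1) prev) (cur[k] :: List.drop (k + 1) cur)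
              = (pMism (List.drop (k + 1) prev) (List.drop (k + 1) cur)).map (· + 1) := by
            simp [pMism, hne]
          rw [hmap]
          cases hbm : pMism (List.drop (k + 1) prev) (List.drop (k + 1) cur) with
          | none => simp
          | some j' =>
            simp only [Option.map_some]
            have harith : k + (j' + 1) = (k + 1) + j' := by omega
            rw [harith]
        · rw [if_pos ⟨hkp, by rw [hgc, hgp]; exact hne⟩]
          unfold aResult
          rw [hdc, hdp]
          have hsome : pMism (prev[k] :: List.drop (k + 1) prev) (cur[k] :: List.drop (k + 1) cur) = some 0 := by
            simp [pMism, hne]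
          rw [hsome]
          rfl
      · rw [if_neg (fun hcon => hkp hcon.1)]
        rw [hstep_lc, hstep_cil, ih (k + 1) (by omega)]
        unfold aResult
        rw [List.drop_eq_nil_of_le (by omega : prev.length ≤ k),
          List.drop_eq_nil_of_le (by omega : prev.length ≤ k + 1)]
        rw [hdc]
        rfl
    · rw [aLoop, dif_neg hkc]
      unfold aResult
      rw [List.drop_eq_nil_of_le (by omega : cur.length ≤ k), pMism_nil_right,
        List.take_of_length_le (by omega : cur.length ≤ k)]

lemma innerDel_eq (prev cur : List Char) (d : Nat) (hdc : d < cur.length) (hdp : d < prev.length) :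
    ∀ m p, prev.length - p ≤ m → d ≤ p →
      aInnerDel prev cur d p =
        (if (p : Int) ≤ (prev.length : Int) - (cur.length : Int) + (d : Int) ∧
            List.drop ((prev.length : Int) - (cur.length : Int) + (d : Int)).toNat prev = List.drop d cur
         then some ((prev.length : Int) - (cur.length : Int) + (d : Int)).toNat else none) := by
  intro m
  induction m with
  | zero =>
    intro p hm hdp2
    rw [aInnerDel, dif_neg (by omega : ¬ p < prev.length)]
    rw [if_neg]
    rintro ⟨hle, hdropeq⟩
    have hlen := congrArg List.length hdropeq
    simp only [List.length_drop] at hlen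
    omega
  | succ m ih =>
    intro p hm hdp2
    by_cases hp : p < prev.length
    · rw [aInnerDel, dif_pos hp]
      by_cases hpeq : (p : Int) = (prev.length : Int) - (cur.length : Int) + (d : Int)
      · have hpt : ((prev.length : Int) - (cur.length : Int) + (d : Int)).toNat = p := by omega
        by_cases hsuf : List.drop p prev = List.drop d cur
        · have hhead : prev.getD p ' ' = cur.getD d ' ' := by
            have h1 : (List.drop p prev).head? = (List.drop d cur).head? := by rw [hsuf]
            rw [List.head?_drop, List.head?_drop] at h1
            rw [List.getD_eq_getElem?_getD, List.getD_eq_getElem?_getD, h1]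
          rw [if_pos ⟨hhead, hsuf.symm⟩, if_pos ⟨by omega, by rw [hpt]; exact hsuf⟩, hpt]
        · rw [if_neg (fun hcon => hsuf hcon.2.symm), ih (p + 1) (by omega) (by omega)]
          rw [if_neg (by rintro ⟨hle, -⟩; omega), if_neg (by rintro ⟨-, hdr⟩; rw [hpt] at hdr; exact hsuf hdr)]
      · by_cases hcondp : prev.getD p ' ' = cur.getD d ' ' ∧ List.drop d cur = List.drop p prev
        · exfalso
          have hlen := congrArg List.length hcondp.2
          simp only [List.length_drop] at hlen
          omega
        · rw [if_neg hcondp, ih (p + 1) (by omega) (by omega)]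
          exact if_congr (and_congr_left' (by constructor <;> (intro hx; omega))) rfl rfl
    · rw [aInnerDel, dif_neg hp]
      rw [if_neg]
      rintro ⟨hle, hdropeq⟩
      have hlen := congrArg List.length hdropeq
      simp only [List.length_drop] at hlen
      omega

lemma aFindLoop_of_le (seg ins : List Char) (L : Nat) (f : Int) (fuel : Nat)
    (h0 : -1 < f) (h1 : f ≤ (L : Int)) : aFindLoop seg ins L f fuel = f := by
  cases fuel <;> simp [aFindLoop, h0, h1]

lemma aFindLoop_of_neg (seg ins : List Char) (L : Nat) (f : Int) (fuel : Nat)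
    (h0 : ¬ -1 < f) : aFindLoop seg ins L f fuel = -1 := by
  cases fuel <;> simp [aFindLoop, h0]

lemma aFindLoop_of_gt (seg ins : List Char) (hne : ins ≠ []) :
    ∀ fuel (f : Int), (ins.length : Int) < f → ins <+: List.drop f.toNat seg →
      aFindLoop seg ins ins.length f fuel = -1 := by
  intro fuel
  induction fuel with
  | zero =>
    intro f hf hpre
    have h0 : -1 < f := by omega
    have h1 : ¬ f ≤ (ins.length : Int) := by omega
    simp [aFindLoop, h0, h1]
  | succ n ih =>
    intro f hf hpre
    have h0 : -1 < f := by omega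
    have h1 : ¬ f ≤ (ins.length : Int) := by omega
    simp only [aFindLoop, if_pos h0, if_neg h1]
    have hlpos : 0 < ins.length := List.length_pos_iff.mpr hne
    have hflen : f.toNat + ins.length ≤ seg.length := by
      have h2 := hpre.length_le
      simp [List.length_drop] at h2
      omega
    have hk : f.toNat + 1 ≤ seg.length := by omega
    have hcast : ((f.toNat + 1 : Nat) : Int) = f + 1 := by omega
    rw [← hcast]
    by_cases hf2 : PySem.Chars.findFrom seg ins ((f.toNat + 1 : Nat) : Int) none = -1
    · rw [hf2]
      exact aFindLoop_of_neg _ _ _ _ _ (by omega)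
    · obtain ⟨hge, hpreN, -⟩ := PySem.Chars.findFrom_natCast_spec seg ins (f.toNat + 1) hk hf2
      exact ih _ (by omega) hpreN

-- newline-index facts
lemma pNl_length (s : List Char) : (pNl s).length = s.count '\n' := by
  induction s with
  | nil => rfl
  | cons ch t ih =>
    by_cases h : ch = '\n'
    · subst h; simp [pNl, ih]
    · simp [pNl, h, ih]

lemma pNl_concat (s : List Char) (ch : Char) :
    pNl (s ++ [ch]) = pNl s ++ (if ch = '\n' then [s.length] else []) := by
  induction s with
  | nil => by_cases h : ch = '\n' <;> simp [pNl, h]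
  | cons a t ih =>
    by_cases ha : a = '\n'
    · simp only [List.cons_append, pNl, if_pos ha, ih]
      by_cases h : ch = '\n' <;> simp [h, List.map_append]
    · simp only [List.cons_append, pNl, if_neg ha, ih]
      by_cases h : ch = '\n' <;> simp [h, List.map_append]

lemma bNl_aux (s : List Char) : ∀ n, n ≤ s.length →
    (List.range n).filter (fun i => decide (s.getD i ' ' = '\n')) = pNl (List.take n s) := by
  intro n
  induction n with
  | zero => intro _; simp [pNl]
  | succ n ih =>
    intro hn
    have hlt : n < s.length := by omega
    rw [List.range_succ, List.filter_append, ih (by omega),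
      take_succ_concat s n hlt, pNl_concat]
    congr 1
    have hg : s.getD n ' ' = s[n] := List.getD_eq_getElem _ _ hlt
    have hlen : (List.take n s).length = n := by
      rw [List.length_take]; omega
    rw [hlen]
    by_cases h : s[n] = '\n' <;>
      simp [List.filter, List.getElem?_eq_getElem hlt, h]

lemma bNl_eq (s : List Char) : bNl s = pNl s := by
  have h := bNl_aux s s.length le_rfl
  rw [List.take_length] at h
  exact h

lemma cntP_le (s : List Char) : ∀ d : Nat,
    (pNl s).countP (fun p => decide (p ≤ d)) = (List.take (d + 1) s).count '\n' := by
  induction s with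
  | nil => intro d; simp [pNl]
  | cons ch t ih =>
    intro d
    have hcnt : (List.take (d + 1) (ch :: t)).count '\n'
        = (if ch = '\n' then 1 else 0) + (List.take d t).count '\n' := by
      simp only [List.take_succ_cons, List.count_cons]
      by_cases h : ch = '\n' <;> simp [h] <;> omega
    cases d with
    | zero =>
      have hmap : ((pNl t).map (· + 1)).countP (fun p => decide (p ≤ 0)) = 0 := by
        rw [List.countP_map]
        rw [List.countP_eq_zero]
        intro x _
        simp
      by_cases h : ch = '\n' <;> simp [pNl, h]
    | succ d' =>
      have hmap : ((pNl t).map (· + 1)).countP (fun p => decide (p ≤ d' + 1))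
          = (List.take (d' + 1) t).count '\n' := by
        rw [List.countP_map, ← ih d']
        apply List.countP_congr
        intro x _
        simp only [Function.comp]
        by_cases hx : x ≤ d' <;> simp [hx]
      by_cases h : ch = '\n' <;> simp [pNl, h, hmap]

lemma flt (s : List Char) : ∀ d : Nat,
    (pNl s).filter (fun p => decide (p < d)) = pNl (List.take d s) := by
  induction s with
  | nil => intro d; simp [pNl]
  | cons ch t ih =>
    intro d
    cases d with
    | zero =>
      have hnil : ((pNl t).map (· + 1)).filter (fun p => decide (p < 0)) = [] := by
        simp
      by_cases h : ch = '\n'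
      · rw [show pNl (ch :: t) = 0 :: (pNl t).map (· + 1) from by simp [pNl, h]]
        rw [List.filter_cons_of_neg (by simp), hnil]
        simp [pNl]
      · rw [show pNl (ch :: t) = (pNl t).map (· + 1) from by simp [pNl, h], hnil]
        simp [pNl]
    | succ d' =>
      have hmap : ((pNl t).map (· + 1)).filter (fun p => decide (p < d' + 1))
          = ((pNl t).filter (fun p => decide (p < d'))).map (· + 1) := by
        rw [List.filter_map]
        congr 1
        apply List.filter_congr
        intro x _
        simp only [Function.comp]
        by_cases hx : x < d' <;> simp [hx]
      rw [List.take_succ_cons]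
      by_cases h : ch = '\n'
      · rw [show pNl (ch :: t) = 0 :: (pNl t).map (· + 1) from by simp [pNl, h]]
        rw [List.filter_cons_of_pos (by simp), hmap, ih d']
        simp [pNl, h]
      · rw [show pNl (ch :: t) = (pNl t).map (· + 1) from by simp [pNl, h]]
        rw [hmap, ih d']
        simp [pNl, h]

lemma cil_last (s : List Char) :
    (match (pNl s).getLast? with
      | some p => (s.length : Int) - (p : Int)
      | none => (s.length : Int)) = cilSpec s := by
  induction s using List.reverseRecOn with
  | nil => simp [pNl, cilSpec, bTail]
  | append_singleton s ch ih =>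
    rw [cilSpec_append, pNl_concat]
    by_cases h : ch = '\n'
    · simp [h]
    · simp only [if_neg h, List.append_nil]
      cases hl : (pNl s).getLast? with
      | none =>
        simp only [hl] at ih ⊢
        rw [← ih]
        simp [List.length_append]
      | some p =>
        simp only [hl] at ih ⊢
        rw [← ih]
        simp only [List.length_append, List.length_singleton]
        push_cast
        ring

lemma pSplit_ne_nil (s : List Char) : pSplit s ≠ [] := by
  cases s with
  | nil => simp [pSplit]
  | cons ch t =>
    simp only [pSplit]
    by_cases h : ch = '\n'
    · simp [h]
    · rw [if_neg h]
      cases pSplit t <;> simp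

lemma pSplit_length (s : List Char) : (pSplit s).length = (pNl s).length + 1 := by
  induction s with
  | nil => rfl
  | cons ch t ih =>
    by_cases h : ch = '\n'
    · simp [pSplit, pNl, h, ih]
    · simp only [pSplit, pNl, if_neg h]
      cases hs : pSplit t with
      | nil => exact absurd hs (pSplit_ne_nil t)
      | cons hh rr =>
        rw [hs] at ih
        simpa using ih

lemma pSplit_getLast? (s : List Char) :
    (pSplit s).getLast? = some ((pSplit s).getD (pNl s).length []) := by
  have hlen := pSplit_length s
  rw [List.getLast?_eq_getElem?, hlen]
  simp only [Nat.add_sub_cancel]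
  rw [List.getElem?_eq_getElem (by omega)]
  congr 1
  simp [List.getD_eq_getElem?_getD,
    List.getElem?_eq_getElem (show (pNl s).length < (pSplit s).length by omega)]

lemma go_spec : ∀ (fuel : Nat) (s curAcc : List Char) (acc : List (List Char)), s.length < fuel →
    PySem.Chars.splitOn.go ['\n'] fuel s curAcc acc = acc.reverse ++ hpre curAcc.reverse (pSplit s) := by
  intro fuel
  induction fuel with
  | zero => intro s curAcc acc h; omega
  | succ n ih =>
    intro s curAcc acc h
    cases s with
    | nil => simp [PySem.Chars.splitOn.go, pSplit, hpre]
    | cons hd t =>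
      simp only [PySem.Chars.splitOn.go]
      by_cases hc : hd = '\n'
      · subst hc
        have hp : List.isPrefixOf ['\n'] ('\n' :: t) = true := by simp [List.isPrefixOf]
        simp only [hp, if_true, List.length_singleton, List.drop_one, List.tail_cons]
        rw [ih t [] (curAcc.reverse :: acc) (by simpa using h)]
        have hh : hpre ([] : List Char).reverse (pSplit t) = pSplit t := by
          cases hs : pSplit t with
          | nil => exact absurd hs (pSplit_ne_nil t)
          | cons a r => simp [hpre]
        rw [hh, show pSplit ('\n' :: t) = [] :: pSplit t from by simp [pSplit]]
        simp [hpre]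
      · have hc2 : ¬ ('\n' = hd) := fun hh => hc hh.symm
        have hp : List.isPrefixOf ['\n'] (hd :: t) = false := by
          simp [List.isPrefixOf, hc2]
        simp only [hp, Bool.false_eq_true, if_false]
        rw [ih t (hd :: curAcc) acc (by simpa using h)]
        simp only [pSplit, if_neg hc]
        cases hs : pSplit t with
        | nil => exact absurd hs (pSplit_ne_nil t)
        | cons a r => simp [hpre]

lemma splitOn_eq_pSplit (s : List Char) : PySem.Chars.splitOn s ['\n'] = pSplit s := by
  have h : PySem.Chars.splitOn s ['\n'] = PySem.Chars.splitOn.go ['\n'] (s.length + 1) s [] [] := by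
    simp [PySem.Chars.splitOn]
  rw [h, go_spec (s.length + 1) s [] [] (by omega)]
  have hh : hpre [] (pSplit s) = pSplit s := by
    cases hs : pSplit s with
    | nil => exact absurd hs (pSplit_ne_nil s)
    | cons a r => simp [hpre]
  simp [hh]

lemma getD_map_add_one (l : List Nat) (i : Nat) (h : i < l.length) :
    (l.map (· + 1)).getD i 0 = l.getD i 0 + 1 := by
  simp [List.getD_eq_getElem?_getD, h]

-- per-line lengths of pSplit from the newline positions
lemma lineCoreN (s : List Char) : ∀ j : Nat, j ≤ (pNl s).length →
    ((pSplit s).getD j []).length + (if 0 < j then (pNl s).getD (j - 1) 0 + 1 else 0)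
      = (if j < (pNl s).length then (pNl s).getD j 0 else s.length) := by
  induction s with
  | nil =>
    intro j hj
    simp [pNl] at hj
    subst hj
    simp [pSplit, pNl]
  | cons ch t ih =>
    intro j hj
    by_cases h : ch = '\n'
    · rw [show pNl (ch :: t) = 0 :: (pNl t).map (· + 1) from by simp [pNl, h]] at hj ⊢
      rw [show pSplit (ch :: t) = [] :: pSplit t from by simp [pSplit, h]]
      rw [show (ch :: t).length = t.length + 1 from rfl]
      simp only [List.length_cons, List.length_map] at hj ⊢
      cases j with
      | zero => simp
      | succ j' =>
        have hj' : j' ≤ (pNl t).length := by omega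
        have hih := ih j' hj'
        simp only [List.getD_cons_succ, Nat.add_sub_cancel]
        rw [if_pos (by omega : 0 < j' + 1)]
        cases j' with
        | zero =>
          simp only [List.getD_cons_zero]
          rw [if_neg (by omega : ¬ 0 < 0)] at hih
          by_cases h0 : 0 < (pNl t).length
          · rw [if_pos h0] at hih
            rw [if_pos (by omega : 0 + 1 < (pNl t).length + 1), getD_map_add_one _ _ h0]
            omega
          · rw [if_neg h0] at hih
            rw [if_neg (by omega : ¬ 0 + 1 < (pNl t).length + 1)]
            omega
        | succ j'' =>
          have hj'' : j'' < (pNl t).length := by omega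
          rw [if_pos (by omega : 0 < j'' + 1)] at hih
          simp only [Nat.add_sub_cancel] at hih
          rw [List.getD_cons_succ, getD_map_add_one _ _ hj'']
          by_cases hlt : j'' + 1 < (pNl t).length
          · rw [if_pos hlt] at hih
            rw [if_pos (by omega : j'' + 1 + 1 < (pNl t).length + 1),
              getD_map_add_one _ _ hlt]
            omega
          · rw [if_neg hlt] at hih
            rw [if_neg (by omega : ¬ j'' + 1 + 1 < (pNl t).length + 1)]
            omega
    · obtain ⟨hh, rr, hs⟩ : ∃ hh rr, pSplit t = hh :: rr := by
        cases hs : pSplit t with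
        | nil => exact absurd hs (pSplit_ne_nil t)
        | cons a r => exact ⟨a, r, rfl⟩
      rw [show pNl (ch :: t) = (pNl t).map (· + 1) from by simp [pNl, h]] at hj ⊢
      rw [show pSplit (ch :: t) = (ch :: hh) :: rr from by simp [pSplit, h, hs]]
      rw [show (ch :: t).length = t.length + 1 from rfl]
      simp only [List.length_map] at hj ⊢
      cases j with
      | zero =>
        have hih := ih 0 (by omega)
        rw [hs] at hih
        rw [if_neg (by omega : ¬ 0 < 0)] at hih ⊢
        simp only [List.getD_cons_zero, List.length_cons, Nat.add_zero] at hih ⊢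
        by_cases h0 : 0 < (pNl t).length
        · rw [if_pos h0] at hih ⊢
          rw [getD_map_add_one _ _ h0]
          omega
        · rw [if_neg h0] at hih ⊢
          omega
      | succ j' =>
        have hih := ih (j' + 1) (by omega)
        rw [hs] at hih
        simp only [List.getD_cons_succ, Nat.add_sub_cancel] at hih ⊢
        have hj1 : j' < (pNl t).length := by omega
        rw [if_pos (by omega : 0 < j' + 1)] at hih ⊢
        rw [getD_map_add_one _ _ hj1]
        by_cases hlt : j' + 1 < (pNl t).length
        · rw [if_pos hlt] at hih ⊢
          rw [getD_map_add_one _ _ hlt]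
          omega
        · rw [if_neg hlt] at hih ⊢
          omega

lemma lineLen_eq (cur : List Char) (li : Int) (hli : 0 ≤ li) :
    (((if li < ((pSplit cur).length : Int) then (PySem.List.pyGet? (pSplit cur) li).getD []
        else (PySem.List.pyGet? (pSplit cur) (-1)).getD []).length : Int))
      = bLineLen (bNl cur) cur.length li := by
  have hlen := pSplit_length cur
  rw [bNl_eq]
  set n := (pNl cur).length with hn
  by_cases hlt : li < ((pSplit cur).length : Int)
  · rw [if_pos hlt]
    have hj : li.toNat ≤ n := by omega
    have hc := lineCoreN cur li.toNat hj
    have hA : (PySem.List.pyGet? (pSplit cur) li).getD [] = (pSplit cur).getD li.toNat [] := by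
      obtain ⟨m, rfl⟩ : ∃ m : Nat, li = (m : Int) := ⟨li.toNat, by omega⟩
      rw [PySem.List.pyGet?_natCast]
      simp [List.getD_eq_getElem?_getD, Int.toNat_natCast]
    rw [hA]
    simp only [bLineLen]
    rw [show min li (n : Int) = li by omega]
    by_cases h1 : li.toNat < n
    · rw [if_pos h1] at hc
      rw [if_pos (show li < (n : Int) by omega)]
      by_cases h2 : 0 < li.toNat
      · rw [if_pos h2] at hc
        rw [if_pos (show (0 : Int) < li by omega)]
        omega
      · rw [if_neg h2] at hc
        rw [if_neg (show ¬ (0 : Int) < li by omega)]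
        omega
    · rw [if_neg h1] at hc
      rw [if_neg (show ¬ li < (n : Int) by omega)]
      by_cases h2 : 0 < li.toNat
      · rw [if_pos h2] at hc
        rw [if_pos (show (0 : Int) < li by omega)]
        omega
      · rw [if_neg h2] at hc
        rw [if_neg (show ¬ (0 : Int) < li by omega)]
        omega
  · rw [if_neg hlt]
    have hc := lineCoreN cur n (by omega)
    have hget : PySem.List.pyGet? (pSplit cur) (-1) = (pSplit cur).getLast? := by
      simp [pysem]
    have hlast : (pSplit cur).getLast? = some ((pSplit cur).getD n []) := by
      rw [List.getLast?_eq_getElem?, hlen]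
      simp only [Nat.add_sub_cancel]
      rw [List.getElem?_eq_getElem (by omega)]
      congr 1
      simp [List.getD_eq_getElem?_getD,
        List.getElem?_eq_getElem (show n < (pSplit cur).length by omega)]
    rw [hget, hlast, Option.getD_some]
    simp only [bLineLen]
    rw [show min li (n : Int) = (n : Int) by omega,
      show ((n : Int)).toNat = n by omega]
    rw [if_neg (show ¬ (n : Int) < (n : Int) by omega), if_neg (by omega : ¬ n < n)] at *
    by_cases h2 : 0 < n
    · rw [if_pos h2] at hc
      rw [if_pos (show (0 : Int) < (n : Int) by omega)]
      omega
    · rw [if_neg h2] at hc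
      rw [if_neg (show ¬ (0 : Int) < (n : Int) by omega)]
      omega

-- B's first-mismatch search equals the structural pMism
lemma zip_findIdx_eq (prev cur : List Char) :
    (List.zip prev cur).findIdx? (fun pc => pc.1 != pc.2) = pMism prev cur := by
  induction prev generalizing cur with
  | nil => cases cur <;> rfl
  | cons a p' ih =>
    cases cur with
    | nil => rfl
    | cons b c' =>
      by_cases hab : b = a
      · subst hab
        simp only [List.zip_cons_cons, List.findIdx?_cons, bne_self_eq_false,
          Bool.false_eq_true, if_false, ih]
        simp [pMism]
      · have h1 : (a != b) = true := by
          simp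
          exact fun hh => hab hh.symm
        simp only [List.zip_cons_cons, List.findIdx?_cons, h1, if_true]
        simp [pMism, hab]

lemma bMism_eq (prev cur : List Char) :
    bMism prev cur = (match pMism prev cur with
      | some j => (j : Int)
      | none => -1) := by
  simp only [bMism, zip_findIdx_eq]

-- B's candidate-offset scan equals the accepted-find expression
lemma bScan_eq_aux (seg ins : List Char) :
    ∀ (m off : Nat), ins.length + 1 - off ≤ m →
      (∀ i, i < off → ¬ ins <+: List.drop i seg) →
      bScan seg ins ins.length off =
        (if 0 ≤ PySem.Chars.find seg ins ∧ PySem.Chars.find seg ins ≤ (ins.length : Int)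
          then PySem.Chars.find seg ins else -1) := by
  intro m
  induction m with
  | zero =>
    intro off hm hinv
    rw [bScan, dif_neg (by omega : ¬ off ≤ ins.length)]
    rw [if_neg]
    rintro ⟨h0, h1⟩
    have hspec := (PySem.Chars.find_spec (s := seg) (sub := ins) h0).1
    exact hinv _ (by omega) hspec
  | succ m ih =>
    intro off hm hinv
    by_cases hoff : off ≤ ins.length
    · rw [bScan, dif_pos hoff]
      have hoz : off = 0 ∨ ins ≠ [] := by
        by_cases hi : ins = []
        · left
          by_contra hne
          exact hinv 0 (by omega) (by simp [hi])
        · right; exact hi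
      have hcond : (off + ins.length ≤ seg.length ∧ (List.drop off seg).take ins.length = ins)
          ↔ ins <+: List.drop off seg := by
        constructor
        · rintro ⟨hle, htk⟩
          rw [← htk]
          exact List.take_prefix _ _
        · intro hpre
          have hlen := hpre.length_le
          simp only [List.length_drop] at hlen
          constructor
          · rcases hoz with h0 | hne
            · subst h0
              simpa using hlen
            · have : 0 < ins.length := List.length_pos_iff.mpr hne
              omega
          · rw [List.prefix_iff_eq_take] at hpre
            exact hpre.symm
      by_cases hc : off + ins.length ≤ seg.length ∧ (List.drop off seg).take ins.length = ins
      · rw [if_pos hc]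
        have hpre := hcond.mp hc
        have hinf : ins <:+: seg := hpre.isInfix.trans (List.drop_suffix off seg).isInfix
        have hf0 : 0 ≤ PySem.Chars.find seg ins :=
          (PySem.Chars.find_nonneg_iff seg ins).mpr hinf
        obtain ⟨hat, hmin⟩ := PySem.Chars.find_spec (s := seg) (sub := ins) hf0
        have hge : off ≤ (PySem.Chars.find seg ins).toNat := by
          by_contra hlt
          exact hinv _ (by omega) hat
        have hle2 : (PySem.Chars.find seg ins).toNat ≤ off := by
          by_contra hgt
          exact hmin off (by omega) hpre
        have heq : PySem.Chars.find seg ins = (off : Int) := by omega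
        rw [heq]
        rw [if_pos ⟨by omega, by omega⟩]
      · rw [if_neg hc]
        have hnp : ¬ ins <+: List.drop off seg := fun hp => hc (hcond.mpr hp)
        refine ih (off + 1) (by omega) ?_
        intro i hi
        by_cases hio : i < off
        · exact hinv i hio
        · have : i = off := by omega
          subst this
          exact hnp
    · rw [bScan, dif_neg hoff]
      rw [if_neg]
      rintro ⟨h0, h1⟩
      have hspec := (PySem.Chars.find_spec (s := seg) (sub := ins) h0).1
      exact hinv _ (by omega) hspec

lemma bScan_eq (seg ins : List Char) :
    bScan seg ins ins.length 0 =
      (if 0 ≤ PySem.Chars.find seg ins ∧ PySem.Chars.find seg ins ≤ (ins.length : Int)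
        then PySem.Chars.find seg ins else -1) :=
  bScan_eq_aux seg ins (ins.length + 1) 0 (by omega) (by omega)

set_option maxHeartbeats 3200000 in
lemma main_eq (previous_text current_text inserted : String) :
    determine_diverges_from previous_text current_text inserted =
      determine_diverges_from_alt previous_text current_text inserted := by
  have hstart : ∀ (pr cu ni : List Char) (dl : Bool), aLoop pr cu ni dl 0 1 0 = aResult pr cu ni dl 0 := by
    intro pr cu ni dl
    have h := aLoop_eq pr cu ni dl cu.length 0 (by omega)
    have e1 : lcSpec (List.take 0 cu) = 1 := by simp [lcSpec]
    have e2 : cilSpec (List.take 0 cu) = 0 := by simp [cilSpec, bTail]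
    rw [e1, e2] at h
    exact h
  simp only [determine_diverges_from, determine_diverges_from_alt]
  by_cases h1 : current_text.toList = [] ∧ inserted.toList = []
  · simp only [if_pos h1]
  · simp only [if_neg h1]
    by_cases h2 : current_text.toList = []
    · rw [if_neg (show ¬ current_text.toList ≠ [] by simpa using h2), if_pos h2]
    · rw [if_pos (show current_text.toList ≠ [] from h2), if_neg h2]
      generalize hNI : PySem.Chars.replace (PySem.Chars.replace inserted.toList ['\r', '\n'] ['\n']) ['\r'] ['\n'] = NI
      generalize hDL : (decide (inserted.toList = []) && decide (current_text.toList.length < previous_text.toList.length)) = DL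
      generalize hIB : (decide (inserted.toList ≠ []) && decide ((current_text.toList.length : Int) - (inserted.toList.length : Int) = (previous_text.toList.length : Int))) = IB
      generalize hCU : PySem.Chars.replace current_text.toList ['\r', '\n'] ['\n'] = CU
      generalize hPR : PySem.Chars.replace previous_text.toList ['\r', '\n'] ['\n'] = PR
      rw [hstart]
      simp only [aResult, List.drop_zero, splitOn_eq_pSplit]
      cases hbm : pMism PR CU with
      | none =>
        rw [show bMism PR CU = (-1 : Int) from by rw [bMism_eq, hbm]]
        simp only [hbm]
        rw [if_pos trivial]
        have hcnt : ((bNl CU).length : Int) = lcSpec CU - 1 := by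
          rw [bNl_eq, lcSpec]
          push_cast [pNl_length]
          ring
        by_cases hsw : IB = true ∧ PySem.Chars.startswith CU PR = true
        · rw [if_pos (show (True ∧ IB = true ∧ PySem.Chars.startswith CU PR = true) from ⟨trivial, hsw.1, hsw.2⟩),
            if_pos (Or.inl hsw), Prod.mk.injEq]
          exact ⟨by omega, rfl⟩
        · rw [if_neg (fun hc => hsw ⟨hc.2.1, hc.2.2⟩)]
          by_cases hdel : DL = true
          · rw [if_pos (show (DL = true ∧ True) from ⟨hdel, trivial⟩), if_pos (Or.inr hdel),
              Prod.mk.injEq, pSplit_length]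
            refine ⟨?_, rfl⟩
            rw [bNl_eq]
            push_cast
            omega
          · rw [if_neg (fun hc => hdel hc.1), if_neg (show ¬ ((-1 : Int) ≥ 0) by norm_num),
              if_neg (fun hc => hc.elim (fun hx => hsw hx) (fun hx => hdel hx))]
      | some j =>
        obtain ⟨hdp, hdc⟩ := pMism_bounds PR CU j hbm
        rw [show bMism PR CU = ((j : Nat) : Int) from by rw [bMism_eq, hbm]]
        simp only [hbm, Nat.zero_add]
        rw [show (((j : Nat) : Int)).toNat = j from Int.toNat_natCast j]
        rw [show PySem.List.pyGetD CU ((j : Nat) : Int) ' ' = CU.getD j ' ' from by simp]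
        rw [if_neg (show ¬ (((j : Nat) : Int) = -1) by omega)]
        -- B's staged lc / cil equal A's loop state at the divergence point
        have hlcB : ((1 : Int) + (List.countP (fun p => decide (p ≤ j)) (bNl CU) : Int))
            = (if CU.getD j ' ' = '\n' then lcSpec (List.take j CU) + 1 else lcSpec (List.take j CU)) := by
          have hg : CU.getD j ' ' = CU[j] := List.getD_eq_getElem _ _ hdc
          rw [bNl_eq, cntP_le, hg,
            show (1 : Int) + ((List.take (j + 1) CU).count '\n' : Int) = lcSpec (List.take (j + 1) CU) from rfl,
            take_succ_concat CU j hdc, lcSpec_append]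
        have hcilB : (if List.filter (fun p => decide (p < j)) (bNl CU) ≠ [] then
              (j : Int) - ((PySem.List.pyGet? (List.filter (fun p => decide (p < j)) (bNl CU)) (-1)).getD 0 : Int)
            else (j : Int)) = cilSpec (List.take j CU) := by
          rw [bNl_eq, flt]
          have hl : (List.take j CU).length = j := by rw [List.length_take]; omega
          have hc := cil_last (List.take j CU)
          rw [hl] at hc
          cases hgl : (pNl (List.take j CU)).getLast? with
          | none =>
            simp only [hgl] at hc
            rw [if_neg (by simpa using List.getLast?_eq_none_iff.mp hgl)]
            exact hc
          | some p =>
            simp only [hgl] at hc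
            rw [if_pos (by intro hnil; rw [hnil] at hgl; simp at hgl),
              show PySem.List.pyGet? (pNl (List.take j CU)) (-1) = (pNl (List.take j CU)).getLast? from by
                simp [pysem]]
            rw [hgl]
            simpa using hc
        rw [hlcB, hcilB]
        generalize hlca : (if CU.getD j ' ' = '\n' then lcSpec (List.take j CU) + 1 else lcSpec (List.take j CU)) = lcA
        generalize hcila : (if CU.getD j ' ' = '\n' then (0 : Int) else cilSpec (List.take j CU)) = cilA
        have hlc1 : 1 ≤ lcA := by
          rw [← hlca]
          split_ifs <;> simp only [lcSpec] <;> omega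
        by_cases hdel : DL = true
        · -- deletion path
          have hIT : inserted.toList = [] := by
            have hdel2 := hdel
            rw [← hDL, Bool.and_eq_true] at hdel2
            exact of_decide_eq_true hdel2.1
          rw [hIT] at hNI
          have hNIe : NI = [] := by rw [← hNI]; decide
          subst hNIe
          rw [if_pos hdel]
          have hinner := innerDel_eq PR CU j hdc hdp PR.length j (by omega) le_rfl
          simp only [add_sub_cancel_right]
          by_cases hcv : ((j : Int) ≤ (PR.length : Int) - (CU.length : Int) + (j : Int) ∧
              List.drop ((PR.length : Int) - (CU.length : Int) + (j : Int)).toNat PR = List.drop j CU)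
          · rw [if_pos hcv] at hinner
            have hge0 : (0 : Int) ≤ (PR.length : Int) - (CU.length : Int) := by omega
            have hPn : ((PR.length : Int) - (CU.length : Int) + (j : Int)).toNat
                = PR.length - CU.length + j := by omega
            have hK : ((PR.length : Int) - (CU.length : Int)).toNat = PR.length - CU.length := by omega
            have hsub : PR.length - CU.length + j - j = PR.length - CU.length := by omega
            rw [hPn] at hinner
            rw [if_pos (show ((PR.length : Int) - (CU.length : Int) + (j : Int) ≥ (j : Int) ∧
                List.drop ((PR.length : Int) - (CU.length : Int) + (j : Int)).toNat PR = List.drop j CU)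
                from ⟨hcv.1, hcv.2⟩), hPn, hK]
            have hlenPR : CU.length ≤ PR.length := by omega
            have hjlen : j + (PR.length - CU.length) ≤ PR.length := by omega
            have hRlen : (List.take (PR.length - CU.length) (List.drop j PR)).length
                = PR.length - CU.length := by
              simp [List.length_take, List.length_drop]
              omega
            have iff_sw : (PySem.Chars.startswith (List.drop (PR.length - CU.length + j + 1) PR)
                  (List.take (PR.length - CU.length + j - j) (List.drop j PR)) = true)
                ↔ (List.take (PR.length - CU.length)
                    (List.drop (PR.length - CU.length + j + 1) PR)
                    = List.take (PR.length - CU.length) (List.drop j PR)) := by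
              rw [hsub, PySem.Chars.startswith_iff, List.prefix_iff_eq_take, hRlen]
              exact eq_comm
            have iff_ew : (PySem.Chars.endswith (List.take j CU)
                  (List.take (PR.length - CU.length + j - j) (List.drop j PR)) = true)
                ↔ ((PR.length : Int) - (CU.length : Int) ≤ (j : Int) ∧
                    List.drop (j - (PR.length - CU.length)) (List.take j CU)
                    = List.take (PR.length - CU.length) (List.drop j PR)) := by
              rw [hsub, PySem.Chars.endswith_iff, List.suffix_iff_eq_drop, hRlen]
              constructor
              · intro hx
                have hlen2 := congrArg List.length hx
                simp only [List.length_drop, List.length_take] at hlen2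
                refine ⟨by omega, ?_⟩
                rw [show (List.take j CU).length = j from by rw [List.length_take]; omega] at hx
                exact hx.symm
              · rintro ⟨hle, heq⟩
                rw [show (List.take j CU).length = j from by rw [List.length_take]; omega]
                exact heq.symm
            by_cases hamb : (PR.length - CU.length + j + 1 < PR.length ∧
                PySem.Chars.startswith (List.drop (PR.length - CU.length + j + 1) PR)
                  (List.take (PR.length - CU.length + j - j) (List.drop j PR)) = true)
                ∨ PySem.Chars.endswith (List.take j CU)
                  (List.take (PR.length - CU.length + j - j) (List.drop j PR)) = true
            · have hA : aDivStep PR CU [] DL j lcA cilA = Sum.inl (lcA - 1, -1) := by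
                unfold aDivStep
                rw [if_pos hdel, hinner]
                simp only [if_pos hamb]
              rw [hA]
              rw [if_pos (show (((PR.length : Int) - (CU.length : Int) + (j : Int) + 1 < (PR.length : Int) ∧
                    List.take (PR.length - CU.length) (List.drop (PR.length - CU.length + j + 1) PR)
                      = List.take (PR.length - CU.length) (List.drop j PR))
                  ∨ ((PR.length : Int) - (CU.length : Int) ≤ (j : Int) ∧
                    List.drop (j - (PR.length - CU.length)) (List.take j CU)
                      = List.take (PR.length - CU.length) (List.drop j PR))) from by
                rcases hamb with ⟨hg, hsw2⟩ | hew
                · exact Or.inl ⟨by omega, iff_sw.mp hsw2⟩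
                · exact Or.inr (iff_ew.mp hew))]
            · have hA : aDivStep PR CU [] DL j lcA cilA
                  = Sum.inr (lcA, (if lcA > 1 then cilA - 1 else cilA), (j : Int),
                      ((PR.length - CU.length + j : Nat) : Int)) := by
                unfold aDivStep
                rw [if_pos hdel, hinner]
                simp only [if_neg hamb]
              rw [hA]
              rw [if_neg (show ¬ (((PR.length : Int) - (CU.length : Int) + (j : Int) + 1 < (PR.length : Int) ∧
                    List.take (PR.length - CU.length) (List.drop (PR.length - CU.length + j + 1) PR)
                      = List.take (PR.length - CU.length) (List.drop j PR))
                  ∨ ((PR.length : Int) - (CU.length : Int) ≤ (j : Int) ∧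
                    List.drop (j - (PR.length - CU.length)) (List.take j CU)
                      = List.take (PR.length - CU.length) (List.drop j PR))) from by
                rintro (⟨hg, heq⟩ | hew)
                · exact hamb (Or.inl ⟨by omega, iff_sw.mpr heq⟩)
                · exact hamb (Or.inr (iff_ew.mpr hew)))]
              simp only [if_neg (show ¬ ((j : Int) = -1 ∧ IB = true ∧ PySem.Chars.startswith CU PR = true)
                    from fun hc => by omega),
                if_neg (show ¬ (DL = true ∧ (j : Int) = -1) from fun hc => by omega),
                if_pos (show (j : Int) ≥ 0 by omega), if_pos hdel]
              rw [show (pSplit ([] : List Char)).length = 1 from rfl,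
                show max (0 : Int) (((1 : Nat) : Int) - 1) = 0 from by norm_num, add_zero,
                lineLen_eq CU (lcA - 1) (by omega)]
          · rw [if_neg hcv] at hinner
            rw [if_neg (show ¬ (((PR.length : Int) - (CU.length : Int) + (j : Int) ≥ (j : Int)) ∧
                List.drop ((PR.length : Int) - (CU.length : Int) + (j : Int)).toNat PR = List.drop j CU)
                from fun hc => hcv ⟨hc.1, hc.2⟩)]
            have hA : aDivStep PR CU [] DL j lcA cilA = Sum.inr (lcA, cilA, (j : Int), -1) := by
              unfold aDivStep
              rw [if_pos hdel, hinner]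
            rw [hA]
            simp only [if_neg (show ¬ ((j : Int) = -1 ∧ IB = true ∧ PySem.Chars.startswith CU PR = true)
                  from fun hc => by omega),
              if_neg (show ¬ (DL = true ∧ (j : Int) = -1) from fun hc => by omega),
              if_pos (show (j : Int) ≥ 0 by omega), if_pos hdel]
            rw [show (pSplit ([] : List Char)).length = 1 from rfl,
              show max (0 : Int) (((1 : Nat) : Int) - 1) = 0 from by norm_num, add_zero,
              lineLen_eq CU (lcA - 1) (by omega)]
        · -- insertion / replacement path
          rw [if_neg hdel, bScan_eq]
          have hfm1 : -1 ≤ PySem.Chars.find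
              (List.take (j + NI.length - (j - NI.length)) (List.drop (j - NI.length) CU)) NI :=
            PySem.Chars.neg_one_le_find _ _
          by_cases hf1 : PySem.Chars.find
              (List.take (j + NI.length - (j - NI.length)) (List.drop (j - NI.length) CU)) NI = -1
          · have hA : aDivStep PR CU NI DL j lcA cilA = Sum.inl (-1, -1) := by
              unfold aDivStep
              rw [if_neg hdel, if_pos (by rw [hf1]; exact aFindLoop_of_neg _ _ _ _ _ (by omega))]
            rw [hA, if_neg (show ¬ ((0 : Int) ≤ PySem.Chars.find
                (List.take (j + NI.length - (j - NI.length)) (List.drop (j - NI.length) CU)) NI ∧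
                PySem.Chars.find (List.take (j + NI.length - (j - NI.length)) (List.drop (j - NI.length) CU)) NI
                  ≤ (NI.length : Int)) from fun hc => by omega), if_pos rfl]
          · by_cases hf2 : PySem.Chars.find
                (List.take (j + NI.length - (j - NI.length)) (List.drop (j - NI.length) CU)) NI
                ≤ (NI.length : Int)
            · have hloop2 := aFindLoop_of_le
                (List.take (j + NI.length - (j - NI.length)) (List.drop (j - NI.length) CU)) NI NI.length
                (PySem.Chars.find (List.take (j + NI.length - (j - NI.length)) (List.drop (j - NI.length) CU)) NI)
                ((List.take (j + NI.length - (j - NI.length)) (List.drop (j - NI.length) CU)).length + 1)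
                (by omega) hf2
              have hA : aDivStep PR CU NI DL j lcA cilA = Sum.inr (lcA,
                  ((j - NI.length : Nat) : Int) + PySem.Chars.find
                    (List.take (j + NI.length - (j - NI.length)) (List.drop (j - NI.length) CU)) NI,
                  (j : Int), -1) := by
                unfold aDivStep
                rw [if_neg hdel]
                rw [if_neg (by rw [hloop2]; exact hf1)]
                rw [hloop2]
              rw [hA, if_pos (show ((0 : Int) ≤ PySem.Chars.find
                  (List.take (j + NI.length - (j - NI.length)) (List.drop (j - NI.length) CU)) NI ∧
                  PySem.Chars.find (List.take (j + NI.length - (j - NI.length)) (List.drop (j - NI.length) CU)) NI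
                    ≤ (NI.length : Int)) from ⟨by omega, hf2⟩), if_neg hf1]
              simp only [if_neg (show ¬ ((j : Int) = -1 ∧ IB = true ∧ PySem.Chars.startswith CU PR = true)
                    from fun hc => by omega),
                if_neg (show ¬ (DL = true ∧ (j : Int) = -1) from fun hc => by omega),
                if_pos (show (j : Int) ≥ 0 by omega), if_neg hdel]
              have hli : max 0 (((pSplit NI).length : Int) - 1) = ((pNl NI).length : Int) := by
                rw [pSplit_length]
                push_cast
                omega
              rw [hli, show bNl NI = pNl NI from bNl_eq NI,
                lineLen_eq CU (lcA - 1 + ((pNl NI).length : Int)) (by omega)]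
              have hiff : (pSplit NI).length > 1 ↔ pNl NI ≠ [] := by
                rw [pSplit_length]
                constructor
                · intro hgt
                  exact List.ne_nil_of_length_pos (by omega)
                · intro hne
                  have := List.length_pos_iff.mpr hne
                  omega
              by_cases hml : pNl NI ≠ []
              · rw [if_pos (hiff.mpr hml), if_pos hml]
                have hn0 : 0 < (pNl NI).length := List.length_pos_iff.mpr hml
                have hcore := lineCoreN NI (pNl NI).length le_rfl
                rw [if_neg (by omega : ¬ (pNl NI).length < (pNl NI).length),
                  if_pos hn0] at hcore
                have hlastA : (PySem.List.pyGet? (pSplit NI) (-1)).getD []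
                    = (pSplit NI).getD (pNl NI).length [] := by
                  rw [show PySem.List.pyGet? (pSplit NI) (-1) = (pSplit NI).getLast? from by simp [pysem],
                    pSplit_getLast?]
                  rfl
                have hlastB : (PySem.List.pyGet? (pNl NI) (-1)).getD 0
                    = (pNl NI).getD ((pNl NI).length - 1) 0 := by
                  rw [show PySem.List.pyGet? (pNl NI) (-1) = (pNl NI).getLast? from by simp [pysem],
                    List.getLast?_eq_getElem?, List.getElem?_eq_getElem (by omega)]
                  simp [List.getD_eq_getElem?_getD, List.getElem?_eq_getElem
                    (show (pNl NI).length - 1 < (pNl NI).length by omega)]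
                rw [hlastA, hlastB, Prod.mk.injEq]
                refine ⟨rfl, ?_⟩
                omega
              · rw [if_neg (fun hgt => hml (hiff.mp hgt)), if_neg hml]
            · have hne2 : NI ≠ [] := by
                intro hx
                rw [hx] at hf2
                simp [PySem.Chars.find_nil] at hf2
              have hpre := (PySem.Chars.find_spec
                (s := (List.take (j + NI.length - (j - NI.length)) (List.drop (j - NI.length) CU)))
                (sub := NI) (by omega)).1
              have hloop2 := aFindLoop_of_gt
                (List.take (j + NI.length - (j - NI.length)) (List.drop (j - NI.length) CU)) NI hne2
                ((List.take (j + NI.length - (j - NI.length)) (List.drop (j - NI.length) CU)).length + 1)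
                (PySem.Chars.find (List.take (j + NI.length - (j - NI.length)) (List.drop (j - NI.length) CU)) NI)
                (by omega) hpre
              have hA : aDivStep PR CU NI DL j lcA cilA = Sum.inl (-1, -1) := by
                unfold aDivStep
                rw [if_neg hdel, if_pos hloop2]
              rw [hA, if_neg (show ¬ ((0 : Int) ≤ PySem.Chars.find
                  (List.take (j + NI.length - (j - NI.length)) (List.drop (j - NI.length) CU)) NI ∧
                  PySem.Chars.find (List.take (j + NI.length - (j - NI.length)) (List.drop (j - NI.length) CU)) NI
                    ≤ (NI.length : Int)) from fun hc => hf2 hc.2), if_pos rfl]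


-- ===== VERDICT (by name: the statement is the Claim_ definition above) =====
theorem determine_diverges_from_spec : Claim_equal_determine_diverges_from := by
  intro p c i _
  unfold Spec_determine_diverges_from
  exact main_eq p c i
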